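-- pv_equiv track=rewrite | github.com/nileshsarkarRA/fermeon | generate_domains.py | dedupe_merge
-- ===== SOURCE A (Python) =====
-- def dedupe_merge(existing: list[str], new: list[str]) -> list[str]:
--     seen: set[str] = set()
--     result: list[str] = []
--     for d in existing + new:
--         key = d.strip().lower()
--         if key and key not in seen:
--             seen.add(key)
--             result.append(d.strip())
--     return sorted(result, key=str.lower)
-- ===== SOURCE B (Python) =====
-- def dedupe_merge(existing: list[str], new: list[str]) -> list[str]:
--     vals = []
--     for d in existing + new:
--         v = d.strip()
--         if v:
--             vals.append(v)
--     vals.sort(key=str.lower)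
--     out = []
--     prev = None
--     for v in vals:
--         k = v.lower()
--         if k != prev:
--             out.append(v)
--             prev = k
--     return out
-- ===== Notes on version B (the rewrite author's own statement) =====
-- stated objective: alternative
-- what changed: Replaces the seen-set first-occurrence dedup followed by a sort with: filter/strip once, stably sort everything by lowercase, then a single linear scan that keeps the first element of each equal-key run (no set at all).
import Mathlib
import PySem

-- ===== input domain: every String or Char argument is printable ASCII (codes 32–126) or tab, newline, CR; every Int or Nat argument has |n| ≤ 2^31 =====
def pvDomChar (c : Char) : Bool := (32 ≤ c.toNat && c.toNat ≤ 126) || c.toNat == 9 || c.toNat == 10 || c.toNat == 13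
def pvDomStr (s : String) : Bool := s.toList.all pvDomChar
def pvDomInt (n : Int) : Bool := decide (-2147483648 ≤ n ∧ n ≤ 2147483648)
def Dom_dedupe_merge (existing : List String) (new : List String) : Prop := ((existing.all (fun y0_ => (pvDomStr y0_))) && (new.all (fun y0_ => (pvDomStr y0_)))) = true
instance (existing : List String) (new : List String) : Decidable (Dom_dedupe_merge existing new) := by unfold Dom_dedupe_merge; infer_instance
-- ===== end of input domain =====

-- B replaces A's seen-set dedup-then-sort with: strip/filter once, stably sort by lowercase,
-- then one linear scan keeping the first element of each equal-lowercase-key run (alternative decomposition, no set).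

-- ===== PORT A =====
def dedupe_merge (existing : List String) (new : List String) : List String :=
  PySem.List.sorted
    ((existing ++ new).foldl
      (fun (st : PySem.Set String × List String) d =>
        let key := PySem.Str.lower (PySem.Str.strip d)
        if key ≠ "" ∧ key ∉ st.1 then
          (PySem.Set.add st.1 key, st.2 ++ [PySem.Str.strip d])
        else st)
      (PySem.Set.empty, [])).2
    (fun s => PySem.Str.lower s) false

-- ===== PORT B =====
def dedupe_merge_alt (existing : List String) (new : List String) : List String :=
  ((PySem.List.sorted
      ((existing ++ new).filterMap (fun d =>
        let v := PySem.Str.strip d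
        if v = "" then none else some v))
      (fun v => PySem.Str.lower v) false).foldl
    (fun (st : Option String × List String) v =>
      let k := PySem.Str.lower v
      if st.1 = some k then st else (some k, st.2 ++ [v]))
    (none, [])).2

-- ===== PRECONDITION & SPEC =====
def Spec_dedupe_merge (existing : List String) (new : List String) (out : List String) : Prop := out = dedupe_merge_alt existing new
instance (existing : List String) (new : List String) (out : List String) : Decidable (Spec_dedupe_merge existing new out) := by unfold Spec_dedupe_merge; infer_instance

-- ===== CLAIM (what is proved, stated in full; the proofs are below) =====
def Claim_equal_dedupe_merge : Prop := ∀ (existing : List String) (new : List String), Dom_dedupe_merge existing new → Spec_dedupe_merge existing new (dedupe_merge existing new)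

-- ===== LEMMAS AND PROOFS =====

-- the sort key (lowercase); applied to already-stripped values
abbrev kOf (v : String) : String := PySem.Str.lower v

-- first-occurrence dedup by key with a seen set (characterises A's loop)
def df : List String → PySem.Set String → List String
  | [], _ => []
  | v :: t, seen => if kOf v ∈ seen then df t seen else v :: df t (PySem.Set.add seen (kOf v))

-- run-compression over the sorted list (characterises B's scan)
def run : Option String → List String → List String
  | _, [] => []
  | p, v :: t => if p = some (kOf v) then run p t else v :: run (some (kOf v)) t

def pOf (x : String) : String → Bool := fun v => kOf v == kOf x

theorem lower_eq_empty_iff (s : String) : PySem.Str.lower s = "" ↔ s = "" := by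
  constructor
  · intro h
    have h2 : (PySem.Str.lower s).toList = [] := by rw [h]; rfl
    rw [PySem.Str.toList_lower, PySem.Chars.lower] at h2
    simp at h2
    rw [← String.toList_eq_nil_iff] at h2 ⊢
    exact h2
  · intro h; subst h; rfl

theorem a_fold_eq_df (xs : List String) (seen : PySem.Set String) (res : List String) :
    (xs.foldl
      (fun (st : PySem.Set String × List String) d =>
        let key := PySem.Str.lower (PySem.Str.strip d)
        if key ≠ "" ∧ key ∉ st.1 then
          (PySem.Set.add st.1 key, st.2 ++ [PySem.Str.strip d])
        else st)
      (seen, res)).2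
    = res ++ df (xs.filterMap (fun d =>
        let v := PySem.Str.strip d
        if v = "" then none else some v)) seen := by
  induction xs generalizing seen res with
  | nil => simp [df]
  | cons d t ih =>
    simp only [List.foldl_cons, List.filterMap_cons]
    by_cases hv : PySem.Str.strip d = ""
    · have hk : PySem.Str.lower (PySem.Str.strip d) = "" := (lower_eq_empty_iff _).mpr hv
      have hk0 : PySem.Str.lower "" = "" := rfl
      simp [hv, hk0, ih]
    · have hk : PySem.Str.lower (PySem.Str.strip d) ≠ "" := fun h => hv ((lower_eq_empty_iff _).mp h)
      by_cases hm : PySem.Str.lower (PySem.Str.strip d) ∈ seen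
      · simp [hv, hk, hm, ih, df]
      · simp [hv, hk, hm, ih, df, kOf]

theorem b_fold_eq_run (l : List String) (st : Option String × List String) :
    (l.foldl
      (fun (st : Option String × List String) v =>
        let k := PySem.Str.lower v
        if st.1 = some k then st else (some k, st.2 ++ [v]))
      st).2 = st.2 ++ run st.1 l := by
  induction l generalizing st with
  | nil => simp [run]
  | cons v t ih =>
    simp only [List.foldl_cons]
    by_cases h : st.1 = some (PySem.Str.lower v)
    · simp [h, ih, run, kOf]
    · simp [h, ih, run, kOf]

theorem find?_pOf_cons (x v : String) (t : List String) :
    List.find? (pOf x) (v :: t) = if kOf v = kOf x then some v else List.find? (pOf x) t := by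
  by_cases h : kOf v = kOf x
  · rw [List.find?_cons_of_pos (by simp [pOf, h]), if_pos h]
  · rw [List.find?_cons_of_neg (by simp [pOf, h]), if_neg h]

theorem mem_df (vs : List String) (seen : PySem.Set String) (x : String) :
    x ∈ df vs seen ↔ List.find? (pOf x) vs = some x ∧ kOf x ∉ seen := by
  induction vs generalizing seen with
  | nil => simp [df]
  | cons v t ih =>
    rw [find?_pOf_cons]
    by_cases hm : kOf v ∈ seen
    · rw [df, if_pos hm, ih]
      constructor
      · rintro ⟨hf, hns⟩
        have hne : ¬ kOf v = kOf x := fun h => hns (h ▸ hm)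
        exact ⟨by rw [if_neg hne]; exact hf, hns⟩
      · rintro ⟨hf, hns⟩
        have hne : ¬ kOf v = kOf x := fun h => hns (h ▸ hm)
        rw [if_neg hne] at hf
        exact ⟨hf, hns⟩
    · rw [df, if_neg hm]
      simp only [List.mem_cons, ih, PySem.Set.mem_add]
      constructor
      · rintro (rfl | ⟨hf, hns⟩)
        · exact ⟨by rw [if_pos rfl], hm⟩
        · have h1 : kOf x ∉ seen := fun h => hns (Or.inl h)
          have h2 : ¬ kOf v = kOf x := fun h => hns (Or.inr h.symm)
          exact ⟨by rw [if_neg h2]; exact hf, h1⟩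
      · rintro ⟨hf, hns⟩
        by_cases he : kOf v = kOf x
        · rw [if_pos he] at hf
          exact Or.inl (Option.some_injective _ hf).symm
        · rw [if_neg he] at hf
          refine Or.inr ⟨hf, ?_⟩
          rintro (h | h)
          · exact hns h
          · exact he h.symm

theorem df_pairwise (vs : List String) (seen : PySem.Set String) :
    (df vs seen).Pairwise (fun a b => kOf a ≠ kOf b) := by
  induction vs generalizing seen with
  | nil => simp [df]
  | cons v t ih =>
    by_cases hm : kOf v ∈ seen
    · rw [df, if_pos hm]; exact ih seen
    · rw [df, if_neg hm]
      refine List.Pairwise.cons ?_ (ih _)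
      intro b hb
      have := (mem_df t _ b).mp hb
      intro he
      exact this.2 ((PySem.Set.mem_add _ _ _).mpr (Or.inr he.symm))

theorem mem_run_some (l : List String) (p x : String)
    (hs : l.Pairwise (fun a b => kOf a ≤ kOf b)) (hp : ∀ y ∈ l, p ≤ kOf y) :
    x ∈ run (some p) l ↔ List.find? (pOf x) l = some x ∧ kOf x ≠ p := by
  induction l generalizing p with
  | nil => simp [run]
  | cons v t ih =>
    rw [find?_pOf_cons]
    have hsv : ∀ y ∈ t, kOf v ≤ kOf y := fun y hy => (List.pairwise_cons.mp hs).1 y hy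
    have hst : t.Pairwise (fun a b => kOf a ≤ kOf b) := (List.pairwise_cons.mp hs).2
    by_cases he : p = kOf v
    · rw [run, if_pos (by rw [he]), ih p hst (fun y hy => he ▸ hsv y hy)]
      by_cases hx : kOf v = kOf x
      · constructor
        · rintro ⟨hf, hne⟩
          exact absurd (he.trans hx).symm hne
        · rintro ⟨hf, hne⟩
          exact absurd (he.trans hx).symm hne
      · rw [if_neg hx]
    · have hlt : p < kOf v := lt_of_le_of_ne (hp v (by simp)) he
      rw [run, if_neg (fun h => he (Option.some_injective _ h)),
        List.mem_cons, ih (kOf v) hst hsv]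
      constructor
      · rintro (rfl | ⟨hf, hne⟩)
        · exact ⟨by rw [if_pos rfl], ne_of_gt hlt⟩
        · have hx : x ∈ t := List.mem_of_find?_eq_some hf
          have : kOf v ≤ kOf x := hsv x hx
          refine ⟨?_, ne_of_gt (lt_of_lt_of_le hlt this)⟩
          have h2 : ¬ kOf v = kOf x := fun h => hne h.symm
          rw [if_neg h2]; exact hf
      · rintro ⟨hf, hne⟩
        by_cases hx : kOf v = kOf x
        · rw [if_pos hx] at hf
          exact Or.inl (Option.some_injective _ hf).symm
        · rw [if_neg hx] at hf
          exact Or.inr ⟨hf, fun h => hx h.symm⟩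

theorem mem_run_none (l : List String) (x : String)
    (hs : l.Pairwise (fun a b => kOf a ≤ kOf b)) :
    x ∈ run none l ↔ List.find? (pOf x) l = some x := by
  cases l with
  | nil => simp [run]
  | cons v t =>
    have hsv : ∀ y ∈ t, kOf v ≤ kOf y := fun y hy => (List.pairwise_cons.mp hs).1 y hy
    have hst : t.Pairwise (fun a b => kOf a ≤ kOf b) := (List.pairwise_cons.mp hs).2
    rw [run, if_neg (by simp), List.mem_cons, mem_run_some t (kOf v) x hst hsv, find?_pOf_cons]
    constructor
    · rintro (rfl | ⟨hf, hne⟩)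
      · rw [if_pos rfl]
      · rw [if_neg (fun h => hne h.symm)]; exact hf
    · intro hf
      by_cases hx : kOf v = kOf x
      · rw [if_pos hx] at hf
        exact Or.inl (Option.some_injective _ hf).symm
      · rw [if_neg hx] at hf
        exact Or.inr ⟨hf, fun h => hx h.symm⟩

theorem run_some_pairwise (l : List String) (p : String)
    (hs : l.Pairwise (fun a b => kOf a ≤ kOf b)) (hp : ∀ y ∈ l, p ≤ kOf y) :
    (run (some p) l).Pairwise (fun a b => kOf a < kOf b) ∧ ∀ x ∈ run (some p) l, p < kOf x := by
  induction l generalizing p with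
  | nil => simp [run]
  | cons v t ih =>
    have hsv : ∀ y ∈ t, kOf v ≤ kOf y := fun y hy => (List.pairwise_cons.mp hs).1 y hy
    have hst : t.Pairwise (fun a b => kOf a ≤ kOf b) := (List.pairwise_cons.mp hs).2
    by_cases he : p = kOf v
    · rw [run, if_pos (by rw [he])]
      exact ih p hst (fun y hy => he ▸ hsv y hy)
    · have hlt : p < kOf v := lt_of_le_of_ne (hp v (by simp)) he
      obtain ⟨hpw, hgt⟩ := ih (kOf v) hst hsv
      rw [run, if_neg (fun h => he (Option.some_injective _ h))]
      refine ⟨List.Pairwise.cons (fun b hb => hgt b hb) hpw, ?_⟩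
      intro x hx
      rcases List.mem_cons.mp hx with rfl | hx
      · exact hlt
      · exact lt_trans hlt (hgt x hx)

theorem run_none_pairwise (l : List String)
    (hs : l.Pairwise (fun a b => kOf a ≤ kOf b)) :
    (run none l).Pairwise (fun a b => kOf a < kOf b) := by
  cases l with
  | nil => simp [run]
  | cons v t =>
    have hsv : ∀ y ∈ t, kOf v ≤ kOf y := fun y hy => (List.pairwise_cons.mp hs).1 y hy
    have hst : t.Pairwise (fun a b => kOf a ≤ kOf b) := (List.pairwise_cons.mp hs).2
    obtain ⟨hpw, hgt⟩ := run_some_pairwise t (kOf v) hst hsv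
    rw [run, if_neg (by simp)]
    exact List.Pairwise.cons (fun b hb => hgt b hb) hpw

theorem insertBy_pairwise (x : String) (acc : List String)
    (hs : acc.Pairwise (fun a b => kOf a ≤ kOf b)) :
    (PySem.List.insertBy (fun a b => decide (kOf a < kOf b)) x acc).Pairwise
      (fun a b => kOf a ≤ kOf b) := by
  induction acc with
  | nil => simp [PySem.List.insertBy]
  | cons y ys ih =>
    have hsy : ∀ z ∈ ys, kOf y ≤ kOf z := fun z hz => (List.pairwise_cons.mp hs).1 z hz
    have hst : ys.Pairwise (fun a b => kOf a ≤ kOf b) := (List.pairwise_cons.mp hs).2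
    rw [PySem.List.insertBy]
    by_cases h : kOf x < kOf y
    · rw [if_pos (by simp [h])]
      refine List.Pairwise.cons ?_ hs
      intro z hz
      rcases List.mem_cons.mp hz with rfl | hz
      · exact le_of_lt h
      · exact le_of_lt (lt_of_lt_of_le h (hsy z hz))
    · rw [if_neg (by simp [h])]
      refine List.Pairwise.cons ?_ (ih hst)
      intro z hz
      rcases (PySem.List.mem_insertBy _ _ _ _).mp hz with rfl | hz
      · exact le_of_not_gt h
      · exact hsy z hz

theorem find?_insertBy (x v : String) (acc : List String)
    (hs : acc.Pairwise (fun a b => kOf a ≤ kOf b)) :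
    List.find? (pOf x) (PySem.List.insertBy (fun a b => decide (kOf a < kOf b)) v acc)
      = (List.find? (pOf x) acc).or (if pOf x v then some v else none) := by
  induction acc with
  | nil =>
    rw [PySem.List.insertBy, find?_pOf_cons]
    by_cases hv : kOf v = kOf x <;> simp [pOf, hv]
  | cons y ys ih =>
    have hsy : ∀ z ∈ ys, kOf y ≤ kOf z := fun z hz => (List.pairwise_cons.mp hs).1 z hz
    have hst : ys.Pairwise (fun a b => kOf a ≤ kOf b) := (List.pairwise_cons.mp hs).2
    rw [PySem.List.insertBy]
    by_cases h : kOf v < kOf y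
    · rw [if_pos (by simp [h])]
      rw [find?_pOf_cons, find?_pOf_cons]
      by_cases hv : kOf v = kOf x
      · rw [if_pos hv]
        -- v's key is below every key in y::ys, so find? on y::ys is none
        have hnone : List.find? (pOf x) (y :: ys) = none := by
          rw [List.find?_eq_none]
          intro z hz
          have hyz : kOf y ≤ kOf z := by
            rcases List.mem_cons.mp hz with rfl | hz
            · exact le_refl _
            · exact hsy z hz
          have : kOf x < kOf z := lt_of_lt_of_le (hv ▸ h) hyz
          simp [pOf]
          exact fun he => absurd he (ne_of_gt this)
        rw [find?_pOf_cons] at hnone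
        rw [hnone]
        simp [pOf, hv]
      · rw [if_neg hv]
        simp [pOf, hv]
    · rw [if_neg (by simp [h])]
      rw [find?_pOf_cons, find?_pOf_cons, ih hst]
      by_cases hy : kOf y = kOf x
      · rw [if_pos hy, if_pos hy]; rfl
      · rw [if_neg hy, if_neg hy]

theorem find?_foldl_insertBy (x : String) (l : List String) : ∀ (acc : List String),
    acc.Pairwise (fun a b => kOf a ≤ kOf b) →
    List.find? (pOf x)
        (l.foldl (fun acc v => PySem.List.insertBy (fun a b => decide (kOf a < kOf b)) v acc) acc)
      = (List.find? (pOf x) acc).or (List.find? (pOf x) l) := by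
  induction l with
  | nil => intro acc _; simp
  | cons v t ih =>
    intro acc hs
    rw [List.foldl_cons, ih _ (insertBy_pairwise v acc hs), find?_insertBy x v acc hs,
      Option.or_assoc, find?_pOf_cons]
    by_cases hv : kOf v = kOf x <;> simp [pOf, hv]

theorem find?_sorted (x : String) (l : List String) :
    List.find? (pOf x) (PySem.List.sorted l (fun v => PySem.Str.lower v) false)
      = List.find? (pOf x) l := by
  rw [PySem.List.sorted_eq_foldl_insertBy l (fun v => PySem.Str.lower v)]
  have h := find?_foldl_insertBy x l [] (by simp)
  simp only [List.find?_nil, Option.none_or] at h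
  exact h

-- ===== VERDICT (by name: the statement is the Claim_ definition above) =====
theorem dedupe_merge_spec : Claim_equal_dedupe_merge := by
  intro existing new _hdom
  unfold Spec_dedupe_merge
  have hA : dedupe_merge existing new
      = PySem.List.sorted
          (df ((existing ++ new).filterMap (fun d =>
            let v := PySem.Str.strip d
            if v = "" then none else some v)) PySem.Set.empty)
          (fun s => PySem.Str.lower s) false := by
    unfold dedupe_merge
    rw [a_fold_eq_df]
    rfl
  have hB : dedupe_merge_alt existing new
      = run none (PySem.List.sorted ((existing ++ new).filterMap (fun d =>
            let v := PySem.Str.strip d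
            if v = "" then none else some v)) (fun v => PySem.Str.lower v) false) := by
    unfold dedupe_merge_alt
    rw [b_fold_eq_run]
    rfl
  set vals := (existing ++ new).filterMap (fun d =>
            let v := PySem.Str.strip d
            if v = "" then none else some v) with hvals
  set svals := PySem.List.sorted vals (fun v => PySem.Str.lower v) false with hsvals
  have hsp : svals.Pairwise (fun a b => kOf a ≤ kOf b) :=
    PySem.List.sorted_pairwise vals (fun v => PySem.Str.lower v)
  have hpwB : (run none svals).Pairwise (fun a b => kOf a < kOf b) :=
    run_none_pairwise svals hsp
  have hnodupB : (run none svals).Nodup :=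
    hpwB.imp (fun h => fun heq => absurd (heq ▸ rfl) (ne_of_lt h))
  have hnodupA : (df vals PySem.Set.empty).Nodup :=
    (df_pairwise vals PySem.Set.empty).imp (fun h => fun heq => h (heq ▸ rfl))
  have hmem : ∀ a, a ∈ run none svals ↔ a ∈ df vals PySem.Set.empty := by
    intro a
    rw [mem_run_none svals a hsp, find?_sorted, mem_df]
    simp [PySem.Set.empty]
  have hperm : (run none svals).Perm (df vals PySem.Set.empty) :=
    (List.perm_ext_iff_of_nodup hnodupB hnodupA).mpr hmem
  rw [hA, hB]
  exact PySem.List.sorted_eq_of_perm_of_pairwise_lt _ _ (fun s => PySem.Str.lower s) hperm hpwB
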